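-- pv_equiv track=rewrite | github.com/TiangeLi/ArduinoCntrl | QT_Mouse_House/LJ_Procs.py | find_samples_per_pack
-- ===== SOURCE A (Python) =====
-- def find_samples_per_pack(scan_freq, n_ch):
--         """Returns optimal samples per packet to use"""
--         hold = []
--         for i in range(scan_freq + 1):
--             if i % n_ch == 0:
--                 hold.append(i)
--         hold = max(hold)
--         hold = max(hold, 1)
--         hold = int(hold)
--         hold = min(hold, 25)
--         return hold
-- ===== SOURCE B (Python) =====
-- def find_samples_per_pack(scan_freq, n_ch):
--     """Returns optimal samples per packet to use"""
--     k = abs(n_ch)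
--     return min(max(scan_freq // k * k, 1), 25)
-- ===== Notes on version B (the rewrite author's own statement) =====
-- stated objective: faster
-- what changed: Replaces the O(scan_freq) loop collecting every multiple of n_ch (then max) with the closed-form largest multiple scan_freq // |n_ch| * |n_ch|, clamped to [1, 25].
import Mathlib
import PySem

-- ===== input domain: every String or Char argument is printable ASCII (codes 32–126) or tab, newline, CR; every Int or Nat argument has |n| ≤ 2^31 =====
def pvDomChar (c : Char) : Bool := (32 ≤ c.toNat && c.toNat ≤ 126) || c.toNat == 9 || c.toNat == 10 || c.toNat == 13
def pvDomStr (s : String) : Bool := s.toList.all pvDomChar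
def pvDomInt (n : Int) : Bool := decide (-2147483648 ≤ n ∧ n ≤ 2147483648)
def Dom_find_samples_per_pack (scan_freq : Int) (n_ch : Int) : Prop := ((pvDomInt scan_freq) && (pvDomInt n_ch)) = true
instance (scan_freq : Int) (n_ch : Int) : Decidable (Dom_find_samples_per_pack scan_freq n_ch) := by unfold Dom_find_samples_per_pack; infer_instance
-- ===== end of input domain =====

-- B replaces A's O(scan_freq) loop over all multiples of n_ch with the closed-form
-- largest multiple scan_freq // |n_ch| * |n_ch|, clamped to [1, 25] (objective: faster).

-- ===== PORT A =====
def find_samples_per_pack (scan_freq : Int) (n_ch : Int) : Int :=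
  -- hold = []; for i in range(scan_freq + 1): if i % n_ch == 0: hold.append(i)
  let hold : List Int :=
    (PySem.List.pyRange 0 (scan_freq + 1) 1).foldl
      (fun acc i => if PySem.Int.mod i n_ch = 0 then acc ++ [i] else acc) []
  -- hold = max(hold)  -- raises ValueError on empty hold; Pre_ guarantees hold nonempty
  let m : Int := (PySem.List.max? hold (fun x => x)).getD 0
  -- hold = max(hold, 1); hold = int(hold); hold = min(hold, 25)
  min (max m 1) 25

-- ===== PORT B =====
def find_samples_per_pack_alt (scan_freq : Int) (n_ch : Int) : Int :=
  let k : Int := |n_ch|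
  min (max (PySem.Int.floordiv scan_freq k * k) 1) 25

-- ===== PRECONDITION & SPEC =====
-- Pre_ excludes exactly the inputs where A raises: n_ch = 0 (ZeroDivisionError at i % n_ch)
-- and scan_freq < 0 (range is empty, so max([]) raises ValueError).
def Pre_find_samples_per_pack (scan_freq : Int) (n_ch : Int) : Prop :=
  0 ≤ scan_freq ∧ n_ch ≠ 0
instance (scan_freq : Int) (n_ch : Int) : Decidable (Pre_find_samples_per_pack scan_freq n_ch) := by
  unfold Pre_find_samples_per_pack; infer_instance
def pvWitness_find_samples_per_pack : Int × Int := (10, 3)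

def Spec_find_samples_per_pack (scan_freq : Int) (n_ch : Int) (out : Int) : Prop := out = find_samples_per_pack_alt scan_freq n_ch
instance (scan_freq : Int) (n_ch : Int) (out : Int) : Decidable (Spec_find_samples_per_pack scan_freq n_ch out) := by unfold Spec_find_samples_per_pack; infer_instance

-- ===== CLAIM (what is proved, stated in full; the proofs are below) =====
def Claim_equal_find_samples_per_pack : Prop := ∀ (scan_freq : Int) (n_ch : Int), Dom_find_samples_per_pack scan_freq n_ch → Pre_find_samples_per_pack scan_freq n_ch → Spec_find_samples_per_pack scan_freq n_ch (find_samples_per_pack scan_freq n_ch)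
-- ===== LEMMAS AND PROOFS =====

-- The largest multiple M = (scan_freq // |n_ch|) * |n_ch| is exactly the maximum A's loop collects.
theorem pv_max_hold (scan_freq n_ch : Int) (hs : 0 ≤ scan_freq) (hn : n_ch ≠ 0) :
    PySem.List.max?
      ((PySem.List.pyRange 0 (scan_freq + 1) 1).foldl
        (fun acc i => if PySem.Int.mod i n_ch = 0 then acc ++ [i] else acc) [])
      (fun x => x)
    = some (PySem.Int.floordiv scan_freq |n_ch| * |n_ch|) := by
  have hk : (0:Int) < |n_ch| := abs_pos.mpr hn
  set M : Int := PySem.Int.floordiv scan_freq |n_ch| * |n_ch| with hM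
  have hfold :
      (PySem.List.pyRange 0 (scan_freq + 1) 1).foldl
        (fun acc i => if PySem.Int.mod i n_ch = 0 then acc ++ [i] else acc) []
      = (PySem.List.pyRange 0 (scan_freq + 1) 1).filter
          (fun i => decide (PySem.Int.mod i n_ch = 0)) := by
    simpa using PySem.List.foldl_append_if
      (fun i => decide (PySem.Int.mod i n_ch = 0)) (fun i => i)
      (PySem.List.pyRange 0 (scan_freq + 1) 1) []
  rw [hfold]
  -- M is in the filtered list
  have hMdvd : n_ch ∣ M := by
    rcases abs_choice n_ch with h | h <;> rw [hM, h]
    · exact Dvd.intro_left _ rfl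
    · exact ⟨-(PySem.Int.floordiv scan_freq (-n_ch)), by ring⟩
  have hMle : M ≤ scan_freq := by
    have := (PySem.Int.le_floordiv_iff_mul_le (a := scan_freq)
      (q := PySem.Int.floordiv scan_freq |n_ch|) hk).mp le_rfl
    exact this
  have hMnn : 0 ≤ M := by
    have h0 : (0:Int) ≤ PySem.Int.floordiv scan_freq |n_ch| := by
      rw [PySem.Int.le_floordiv_iff_mul_le hk]; simpa using hs
    exact mul_nonneg h0 (le_of_lt hk)
  have hMmem : M ∈ (PySem.List.pyRange 0 (scan_freq + 1) 1).filter
      (fun i => decide (PySem.Int.mod i n_ch = 0)) := by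
    rw [List.mem_filter]
    refine ⟨PySem.List.mem_pyRange_one.mpr ⟨hMnn, by omega⟩, ?_⟩
    simp [PySem.Int.mod_eq_zero_iff_dvd, hMdvd]
  -- the list is nonempty, so max? is some m; show m = M
  cases hmx : PySem.List.max?
      ((PySem.List.pyRange 0 (scan_freq + 1) 1).filter
        (fun i => decide (PySem.Int.mod i n_ch = 0))) (fun x => x) with
  | none =>
      exfalso
      have := (PySem.List.max?_eq_none_iff _ _).mp hmx
      rw [this] at hMmem; exact (List.not_mem_nil).elim hMmem
  | some m =>
      have hmmem := PySem.List.max?_mem hmx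
      have hMlem : M ≤ m := PySem.List.max?_isMax hmx M hMmem
      have hmle : m ≤ M := by
        rw [List.mem_filter] at hmmem
        obtain ⟨hrange, hdvd⟩ := hmmem
        have hmub : m ≤ scan_freq := by
          have := (PySem.List.mem_pyRange_one.mp hrange).2; omega
        have hdvd' : |n_ch| ∣ m := by
          simp only [decide_eq_true_eq, PySem.Int.mod_eq_zero_iff_dvd] at hdvd
          exact (abs_dvd _ _).mpr hdvd
        obtain ⟨t, ht⟩ := hdvd'
        have hts : t ≤ PySem.Int.floordiv scan_freq |n_ch| := by
          rw [PySem.Int.le_floordiv_iff_mul_le hk]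
          calc t * |n_ch| = m := by rw [ht]; ring
            _ ≤ scan_freq := hmub
        calc m = t * |n_ch| := by rw [ht]; ring
          _ ≤ PySem.Int.floordiv scan_freq |n_ch| * |n_ch| :=
            mul_le_mul_of_nonneg_right hts (le_of_lt hk)
          _ = M := rfl
      exact congrArg some (le_antisymm hmle hMlem)

-- ===== VERDICT (by name: the statement is the Claim_ definition above) =====
theorem find_samples_per_pack_spec : Claim_equal_find_samples_per_pack := by
  intro scan_freq n_ch _ hpre
  obtain ⟨hs, hn⟩ := hpre
  show find_samples_per_pack scan_freq n_ch = find_samples_per_pack_alt scan_freq n_ch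
  show min (max ((PySem.List.max?
      ((PySem.List.pyRange 0 (scan_freq + 1) 1).foldl
        (fun acc i => if PySem.Int.mod i n_ch = 0 then acc ++ [i] else acc) [])
      (fun x => x)).getD 0) 1) 25
    = min (max (PySem.Int.floordiv scan_freq |n_ch| * |n_ch|) 1) 25
  rw [pv_max_hold scan_freq n_ch hs hn, Option.getD_some]
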